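-- pv_equiv track=rewrite | github.com/aLexzzz430/Cognitive-OS | planner/objective_decomposer.py | _action_family
-- ===== SOURCE A (Python) =====
-- def _action_family(fn_name: str) -> str:
--     name = str(fn_name or '').strip().lower()
--     if not name:
--         return 'generic'
--     if any(token in name for token in ('probe', 'inspect', 'verify', 'check', 'test')):
--         return 'probe'
--     if 'scan' in name:
--         return 'scan'
--     if any(token in name for token in ('calibrate', 'align', 'tune')):
--         return 'calibrate'
--     if any(token in name for token in ('route', 'select', 'choose', 'rank')):
--         return 'route'
--     if any(token in name for token in ('commit', 'apply', 'submit', 'advance', 'finalize')):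
--         return 'commit'
--     if any(token in name for token in ('compute', 'aggregate', 'transform', 'join', 'filter', 'group')):
--         return 'compute'
--     return 'generic'
-- ===== SOURCE B (Python) =====
-- _FAMILIES = ('probe', 'scan', 'calibrate', 'route', 'commit', 'compute')
-- _TOKEN_PRIORITY = [
--     ('probe', 0), ('inspect', 0), ('verify', 0), ('check', 0), ('test', 0),
--     ('scan', 1),
--     ('calibrate', 2), ('align', 2), ('tune', 2),
--     ('route', 3), ('select', 3), ('choose', 3), ('rank', 3),
--     ('commit', 4), ('apply', 4), ('submit', 4), ('advance', 4), ('finalize', 4),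
--     ('compute', 5), ('aggregate', 5), ('transform', 5), ('join', 5), ('filter', 5), ('group', 5),
-- ]
--
-- def _action_family(fn_name: str) -> str:
--     name = str(fn_name or '').strip().lower()
--     if not name:
--         return 'generic'
--     best = None
--     for token, priority in _TOKEN_PRIORITY:
--         if token in name:
--             best = priority if best is None else min(best, priority)
--     return 'generic' if best is None else _FAMILIES[best]
-- ===== Notes on version B (the rewrite author's own statement) =====
-- stated objective: alternative
-- what changed: Instead of an ordered cascade of group checks with early return, B makes one full pass over a flat token->priority table, keeps the minimum priority among all matching tokens, and indexes a family table with it (correct because each group's tokens share one priority and the cascade returns the lowest-priority group that matches).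
import Mathlib
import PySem

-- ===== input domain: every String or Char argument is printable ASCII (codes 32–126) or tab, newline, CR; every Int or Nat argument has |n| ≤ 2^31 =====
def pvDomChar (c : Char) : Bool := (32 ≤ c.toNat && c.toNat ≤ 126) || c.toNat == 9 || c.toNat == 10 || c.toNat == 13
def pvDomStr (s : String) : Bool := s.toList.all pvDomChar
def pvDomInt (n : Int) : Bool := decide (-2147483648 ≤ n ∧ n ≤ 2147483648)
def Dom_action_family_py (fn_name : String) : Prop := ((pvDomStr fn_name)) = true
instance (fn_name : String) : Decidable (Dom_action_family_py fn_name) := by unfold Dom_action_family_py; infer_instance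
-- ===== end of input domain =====

-- B replaces A's ordered early-return cascade by one full pass over a flat token→priority table
-- keeping the minimum matching priority, then indexing a family table (alternative algorithm, same cost).
-- ===== PORT A =====
def action_family_py (fn_name : String) : String :=
  let name := PySem.Str.lower (PySem.Str.strip fn_name)
  if name = "" then "generic"
  else if ["probe", "inspect", "verify", "check", "test"].any (fun token => PySem.Str.isIn token name) then "probe"
  else if PySem.Str.isIn "scan" name then "scan"
  else if ["calibrate", "align", "tune"].any (fun token => PySem.Str.isIn token name) then "calibrate"
  else if ["route", "select", "choose", "rank"].any (fun token => PySem.Str.isIn token name) then "route"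
  else if ["commit", "apply", "submit", "advance", "finalize"].any (fun token => PySem.Str.isIn token name) then "commit"
  else if ["compute", "aggregate", "transform", "join", "filter", "group"].any (fun token => PySem.Str.isIn token name) then "compute"
  else "generic"

-- ===== PORT B =====
def pvFamilies : List String := ["probe", "scan", "calibrate", "route", "commit", "compute"]

def pvTokenPriority : List (String × Nat) :=
  [("probe", 0), ("inspect", 0), ("verify", 0), ("check", 0), ("test", 0),
   ("scan", 1),
   ("calibrate", 2), ("align", 2), ("tune", 2),
   ("route", 3), ("select", 3), ("choose", 3), ("rank", 3),
   ("commit", 4), ("apply", 4), ("submit", 4), ("advance", 4), ("finalize", 4),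
   ("compute", 5), ("aggregate", 5), ("transform", 5), ("join", 5), ("filter", 5), ("group", 5)]

def pvStep (name : String) (best : Option Nat) (tp : String × Nat) : Option Nat :=
  if PySem.Str.isIn tp.1 name then
    match best with
    | none => some tp.2
    | some b => some (min b tp.2)
  else best

def action_family_py_alt (fn_name : String) : String :=
  let name := PySem.Str.lower (PySem.Str.strip fn_name)
  if name = "" then "generic"
  else
    match pvTokenPriority.foldl (pvStep name) none with
    | none => "generic"
    | some p => pvFamilies.getD p "generic"

-- ===== PRECONDITION & SPEC =====
def Spec_action_family_py (fn_name : String) (out : String) : Prop := out = action_family_py_alt fn_name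
instance (fn_name : String) (out : String) : Decidable (Spec_action_family_py fn_name out) := by unfold Spec_action_family_py; infer_instance

-- ===== CLAIM (what is proved, stated in full; the proofs are below) =====
def Claim_equal_action_family_py : Prop := ∀ (fn_name : String), Dom_action_family_py fn_name → Spec_action_family_py fn_name (action_family_py fn_name)

-- ===== LEMMAS AND PROOFS =====
def pvG0 : List (String × Nat) := [("probe", 0), ("inspect", 0), ("verify", 0), ("check", 0), ("test", 0)]
def pvG1 : List (String × Nat) := [("scan", 1)]
def pvG2 : List (String × Nat) := [("calibrate", 2), ("align", 2), ("tune", 2)]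
def pvG3 : List (String × Nat) := [("route", 3), ("select", 3), ("choose", 3), ("rank", 3)]
def pvG4 : List (String × Nat) := [("commit", 4), ("apply", 4), ("submit", 4), ("advance", 4), ("finalize", 4)]
def pvG5 : List (String × Nat) := [("compute", 5), ("aggregate", 5), ("transform", 5), ("join", 5), ("filter", 5), ("group", 5)]

-- once the minimum j is at most every remaining priority, the fold no longer changes
theorem pv_fold_some_le (name : String) (j : Nat) :
    ∀ l : List (String × Nat), (∀ x ∈ l, j ≤ x.2) →
      l.foldl (pvStep name) (some j) = some j
  | [], _ => rfl
  | a :: l, h => by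
      have hj := h a (List.mem_cons_self ..)
      have hstep : pvStep name (some j) a = some j := by
        simp only [pvStep]
        split
        · simp [Nat.min_eq_left hj]
        · rfl
      simp only [List.foldl_cons, hstep]
      exact pv_fold_some_le name j l (fun x hx => h x (List.mem_cons_of_mem _ hx))

-- folding one group (all tokens carry the same priority p) from none
theorem pv_fold_group (name : String) (p : Nat) :
    ∀ l : List (String × Nat), (∀ x ∈ l, x.2 = p) →
      l.foldl (pvStep name) none =
        if l.any (fun x => PySem.Str.isIn x.1 name) then some p else none
  | [], _ => by simp
  | a :: l, h => by
      have hp : a.2 = p := h a (List.mem_cons_self ..)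
      by_cases hm : PySem.Str.isIn a.1 name = true
      · have hstep : pvStep name none a = some p := by
          unfold pvStep; rw [if_pos hm, hp]
        simp only [List.foldl_cons, hstep, List.any_cons, hm, Bool.true_or, if_pos]
        exact pv_fold_some_le name p l
          (fun x hx => by rw [h x (List.mem_cons_of_mem _ hx)])
      · have hstep : pvStep name none a = none := by
          unfold pvStep; rw [if_neg hm]
        simp only [List.foldl_cons, hstep, List.any_cons, Bool.eq_false_iff.mpr hm,
          Bool.false_or]
        exact pv_fold_group name p l (fun x hx => h x (List.mem_cons_of_mem _ hx))

theorem pv_split : pvTokenPriority = pvG0 ++ (pvG1 ++ (pvG2 ++ (pvG3 ++ (pvG4 ++ pvG5)))) := rfl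

-- ===== VERDICT (by name: the statement is the Claim_ definition above) =====
theorem action_family_py_spec : Claim_equal_action_family_py := by
  intro fn_name _
  unfold Spec_action_family_py action_family_py action_family_py_alt
  set name := PySem.Str.lower (PySem.Str.strip fn_name) with hname
  by_cases h0 : name = ""
  · simp only [h0, if_pos]
  · simp only [if_neg h0]
    rw [pv_split, List.foldl_append, List.foldl_append, List.foldl_append,
        List.foldl_append, List.foldl_append]
    by_cases a0 : (["probe", "inspect", "verify", "check", "test"].any (fun token => PySem.Str.isIn token name)) = true
    · rw [if_pos a0, pv_fold_group name 0 pvG0 (by decide),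
          if_pos (show (pvG0.any fun x => PySem.Str.isIn x.1 name) = true from a0)
          , pv_fold_some_le name 0 pvG1 (by decide)
          , pv_fold_some_le name 0 pvG2 (by decide)
          , pv_fold_some_le name 0 pvG3 (by decide)
          , pv_fold_some_le name 0 pvG4 (by decide)
          , pv_fold_some_le name 0 pvG5 (by decide)
          ]
      rfl
    · rw [if_neg a0, pv_fold_group name 0 pvG0 (by decide),
          if_neg (show ¬ (pvG0.any fun x => PySem.Str.isIn x.1 name) = true from a0)]
      by_cases a1 : (PySem.Str.isIn "scan" name) = true
      · rw [if_pos a1, pv_fold_group name 1 pvG1 (by decide),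
            if_pos (show (pvG1.any fun x => PySem.Str.isIn x.1 name) = true by
              simp only [pvG1, List.any_cons, List.any_nil, Bool.or_false]; exact a1)
            , pv_fold_some_le name 1 pvG2 (by decide)
            , pv_fold_some_le name 1 pvG3 (by decide)
            , pv_fold_some_le name 1 pvG4 (by decide)
            , pv_fold_some_le name 1 pvG5 (by decide)
            ]
        rfl
      · rw [if_neg a1, pv_fold_group name 1 pvG1 (by decide),
            if_neg (show ¬ (pvG1.any fun x => PySem.Str.isIn x.1 name) = true by
              simp only [pvG1, List.any_cons, List.any_nil, Bool.or_false]; exact a1)]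
        by_cases a2 : (["calibrate", "align", "tune"].any (fun token => PySem.Str.isIn token name)) = true
        · rw [if_pos a2, pv_fold_group name 2 pvG2 (by decide),
              if_pos (show (pvG2.any fun x => PySem.Str.isIn x.1 name) = true from a2)
              , pv_fold_some_le name 2 pvG3 (by decide)
              , pv_fold_some_le name 2 pvG4 (by decide)
              , pv_fold_some_le name 2 pvG5 (by decide)
              ]
          rfl
        · rw [if_neg a2, pv_fold_group name 2 pvG2 (by decide),
              if_neg (show ¬ (pvG2.any fun x => PySem.Str.isIn x.1 name) = true from a2)]
          by_cases a3 : (["route", "select", "choose", "rank"].any (fun token => PySem.Str.isIn token name)) = true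
          · rw [if_pos a3, pv_fold_group name 3 pvG3 (by decide),
                if_pos (show (pvG3.any fun x => PySem.Str.isIn x.1 name) = true from a3)
                , pv_fold_some_le name 3 pvG4 (by decide)
                , pv_fold_some_le name 3 pvG5 (by decide)
                ]
            rfl
          · rw [if_neg a3, pv_fold_group name 3 pvG3 (by decide),
                if_neg (show ¬ (pvG3.any fun x => PySem.Str.isIn x.1 name) = true from a3)]
            by_cases a4 : (["commit", "apply", "submit", "advance", "finalize"].any (fun token => PySem.Str.isIn token name)) = true
            · rw [if_pos a4, pv_fold_group name 4 pvG4 (by decide),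
                  if_pos (show (pvG4.any fun x => PySem.Str.isIn x.1 name) = true from a4)
                  , pv_fold_some_le name 4 pvG5 (by decide)
                  ]
              rfl
            · rw [if_neg a4, pv_fold_group name 4 pvG4 (by decide),
                  if_neg (show ¬ (pvG4.any fun x => PySem.Str.isIn x.1 name) = true from a4)]
              by_cases a5 : (["compute", "aggregate", "transform", "join", "filter", "group"].any (fun token => PySem.Str.isIn token name)) = true
              · rw [if_pos a5, pv_fold_group name 5 pvG5 (by decide),
                    if_pos (show (pvG5.any fun x => PySem.Str.isIn x.1 name) = true from a5)
                    ]
                rfl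
              · rw [if_neg a5, pv_fold_group name 5 pvG5 (by decide),
                    if_neg (show ¬ (pvG5.any fun x => PySem.Str.isIn x.1 name) = true from a5)]
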